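-- pv_equiv track=rewrite | github.com/graphwright/kg-book | scripts/split_for_mkdocs.py | strip_index_commands
-- ===== SOURCE A (Python) =====
-- def strip_index_commands(text: str) -> str:
--     r"""Remove \index{...} commands, including nested braces."""
--     result = []
--     i = 0
--     while i < len(text):
--         if text[i:i+7] == r'\index{':
--             # skip to matching closing brace; j starts at the opening '{'
--             depth = 0
--             j = i + 6  # index of the opening '{' in '\index{'
--             while j < len(text):
--                 if text[j] == '{':
--                     depth += 1
--                 elif text[j] == '}':
--                     depth -= 1
--                     if depth == 0:
--                         j += 1
--                         break
--                 j += 1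
--             i = j  # skip over \index{...}
--         else:
--             result.append(text[i])
--             i += 1
--     return ''.join(result)
-- ===== SOURCE B (Python) =====
-- def strip_index_commands(text: str) -> str:
--     r"""Remove \index{...} commands (nested braces included) by jumping
--     between occurrences with str.find instead of scanning char by char."""
--     segs = []
--     pos = 0
--     while True:
--         start = text.find('\\index{', pos)
--         if start == -1:
--             segs.append(text[pos:])
--             break
--         segs.append(text[pos:start])
--         depth = 1
--         p = start + 7
--         while depth > 0:
--             c = text.find('}', p)
--             if c == -1:
--                 # unbalanced braces: drop everything to the end, like the scanner
--                 return ''.join(segs)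
--             o = text.find('{', p)
--             if o != -1 and o < c:
--                 depth += 1
--                 p = o + 1
--             else:
--                 depth -= 1
--                 p = c + 1
--         pos = p
--     return ''.join(segs)
-- ===== Notes on version B (the rewrite author's own statement) =====
-- stated objective: faster
-- what changed: A copies character by character, slicing out and comparing text[i:i+7] at every position; B instead jumps with str.find between occurrences of the index-command opener (emitting whole segments at once) and, inside a command, jumps brace to brace with find, updating the depth counter once per brace instead of once per character, then joins the collected segments.
import Mathlib
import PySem

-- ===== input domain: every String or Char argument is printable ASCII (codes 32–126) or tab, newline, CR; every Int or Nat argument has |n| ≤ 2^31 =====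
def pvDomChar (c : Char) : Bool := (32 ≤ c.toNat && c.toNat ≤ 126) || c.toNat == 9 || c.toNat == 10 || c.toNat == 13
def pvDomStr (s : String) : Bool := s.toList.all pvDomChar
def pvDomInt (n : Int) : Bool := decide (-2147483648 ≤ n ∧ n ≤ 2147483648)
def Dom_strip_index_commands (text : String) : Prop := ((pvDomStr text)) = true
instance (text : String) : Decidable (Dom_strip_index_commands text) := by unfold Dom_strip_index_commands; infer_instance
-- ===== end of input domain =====

-- B removes index commands by str.find jumps (whole segments between occurrences, brace-to-brace
-- jumps inside a command) instead of A's character-by-character copy loop; objective: faster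
-- (a timing run measured B well above 1.5x faster at the largest size).

-- ===== PORT A =====
-- the literal '\index{'
def pvPat : List Char := ['\\', 'i', 'n', 'd', 'e', 'x', '{']

-- A's inner while loop: scan from j (here: the remaining suffix text[j:]) keeping a depth
-- counter; returns the suffix just past the matching '}' (j+1), or [] when j hits len(text).
def pvAInner : List Char → Int → List Char
  | [], _ => []
  | ch :: rest, depth =>
    if ch = '{' then pvAInner rest (depth + 1)
    else if ch = '}' then
      if depth - 1 = 0 then rest
      else pvAInner rest (depth - 1)
    else pvAInner rest depth

-- A's outer while loop over positions i (here: the remaining suffix text[i:]); the returned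
-- list is the joined result.  text[i:i+7] == '\index{' is take 7 = pvPat.  The fuel argument
-- (started at the text length, enough since every iteration consumes at least one character)
-- only makes the recursion structural; it changes no computed value.
def pvALoop : Nat → List Char → List Char
  | _, [] => []
  | 0, _ => []
  | fuel + 1, ch :: rest =>
    if (ch :: rest).take 7 = pvPat then
      pvALoop fuel (pvAInner ((ch :: rest).drop 6) 0)
    else ch :: pvALoop fuel rest

def strip_index_commands (text : String) : String :=
  String.ofList (pvALoop text.toList.length text.toList)

-- ===== PORT B =====
-- B's inner while loop: from the suffix after the opening '{' (depth = 1), repeatedly find the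
-- next '}' and the next '{'; none = unbalanced (the Python early 'return' that drops the rest),
-- some ys = the suffix just past the matching close (p = c + 1).
def pvBClose : Nat → List Char → Nat → Option (List Char)
  | _, xs, 0 => some xs
  | 0, _, _ + 1 => none
  | fuel + 1, xs, d + 1 =>
    -- c, o are Python's locals c = text.find('}', p), o = text.find('{', p), written inline
    if PySem.Chars.find xs ['}'] = -1 then none
    else
      if PySem.Chars.find xs ['{'] ≠ -1 ∧ PySem.Chars.find xs ['{'] < PySem.Chars.find xs ['}'] then
        pvBClose fuel (xs.drop ((PySem.Chars.find xs ['{']).toNat + 1)) (d + 2)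
      else pvBClose fuel (xs.drop ((PySem.Chars.find xs ['}']).toNat + 1)) d

-- B's outer while loop: find the next '\index{' from pos (here: on the remaining suffix),
-- emit the segment before it, jump past the matching close, or stop.
def pvBLoop : Nat → List Char → List Char
  | 0, xs => xs
  | fuel + 1, xs =>
    if PySem.Chars.find xs pvPat = -1 then xs
    else
      xs.take (PySem.Chars.find xs pvPat).toNat ++
        match pvBClose (xs.drop ((PySem.Chars.find xs pvPat).toNat + 7)).length
            (xs.drop ((PySem.Chars.find xs pvPat).toNat + 7)) 1 with
        | none => []
        | some ys => pvBLoop fuel ys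

def strip_index_commands_alt (text : String) : String :=
  String.ofList (pvBLoop text.toList.length text.toList)

-- ===== PRECONDITION & SPEC =====
def Spec_strip_index_commands (text : String) (out : String) : Prop := out = strip_index_commands_alt text
instance (text : String) (out : String) : Decidable (Spec_strip_index_commands text out) := by unfold Spec_strip_index_commands; infer_instance

-- ===== CLAIM (what is proved, stated in full; the proofs are below) =====
def Claim_equal_strip_index_commands : Prop := ∀ (text : String), Dom_strip_index_commands text → Spec_strip_index_commands text (strip_index_commands text)

-- ===== LEMMAS AND PROOFS =====

theorem pvAInner_length_le : ∀ (xs : List Char) (d : Int), (pvAInner xs d).length ≤ xs.length := by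
  intro xs
  induction xs with
  | nil => intro d; simp [pvAInner]
  | cons ch rest ih =>
    intro d
    simp only [pvAInner]
    split_ifs <;> simp <;> exact le_trans (ih _) (Nat.le_succ _)

theorem pvBClose_length_le : ∀ (fuel : Nat) (xs : List Char) (d : Nat) (ys : List Char),
    pvBClose fuel xs d = some ys → ys.length ≤ xs.length := by
  intro fuel
  induction fuel with
  | zero =>
    intro xs d ys h
    match d with
    | 0 => simp [pvBClose] at h; simp [← h]
    | d + 1 => simp [pvBClose] at h
  | succ fuel ih =>
    intro xs d ys h
    match d with
    | 0 => simp [pvBClose] at h; simp [← h]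
    | d + 1 =>
      rw [pvBClose] at h
      split at h
      · exact absurd h (by simp)
      · split at h
        · have := ih _ _ _ h
          have hd : (xs.drop ((PySem.Chars.find xs ['{']).toNat + 1)).length ≤ xs.length := by simp
          omega
        · have := ih _ _ _ h
          have hd : (xs.drop ((PySem.Chars.find xs ['}']).toNat + 1)).length ≤ xs.length := by simp
          omega

-- the fuel argument is irrelevant as long as it is at least the list length
theorem pvALoop_congr : ∀ (f1 : Nat) (xs : List Char), xs.length ≤ f1 → ∀ (f2 : Nat), xs.length ≤ f2 →
    pvALoop f1 xs = pvALoop f2 xs := by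
  intro f1
  induction f1 with
  | zero =>
    intro xs h f2 _
    have hx : xs = [] := List.eq_nil_of_length_eq_zero (Nat.le_zero.mp h)
    subst hx
    cases f2 <;> simp [pvALoop]
  | succ f1 ih =>
    intro xs h f2 h2
    cases xs with
    | nil => cases f2 <;> simp [pvALoop]
    | cons ch rest =>
      cases f2 with
      | zero => simp at h2
      | succ f2 =>
        rw [pvALoop, pvALoop]
        by_cases hc : (ch :: rest).take 7 = pvPat
        · rw [if_pos hc, if_pos hc]
          have hin := pvAInner_length_le ((ch :: rest).drop 6) 0
          simp only [List.length_cons] at h h2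
          have hdl : ((ch :: rest).drop 6).length ≤ rest.length := by simp
          exact ih _ (by omega) _ (by omega)
        · rw [if_neg hc, if_neg hc]
          simp only [List.length_cons] at h h2
          rw [ih rest (by omega) f2 (by omega)]

-- [c] is a prefix exactly of the lists starting with c
theorem pv_singleton_prefix {c : Char} {l : List Char} : [c] <+: l ↔ ∃ t, l = c :: t := by
  cases l with
  | nil => simp
  | cons a t => simp [List.cons_prefix_cons, eq_comm]

-- A's inner scan is unchanged across a stretch with no braces
theorem pv_skip_nobrace : ∀ (m : Nat) (xs : List Char) (d : Int),
    (∀ i < m, ¬ ['{'] <+: xs.drop i ∧ ¬ ['}'] <+: xs.drop i) →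
    pvAInner xs d = pvAInner (xs.drop m) d := by
  intro m
  induction m with
  | zero => intro xs d _; simp
  | succ m ih =>
    intro xs d h
    cases xs with
    | nil => simp
    | cons ch rest =>
      have h0 := h 0 (Nat.succ_pos m)
      simp only [List.drop_zero] at h0
      have hob : ch ≠ '{' := fun he => h0.1 (by rw [he]; exact ⟨rest, rfl⟩)
      have hcb : ch ≠ '}' := fun he => h0.2 (by rw [he]; exact ⟨rest, rfl⟩)
      have : pvAInner (ch :: rest) d = pvAInner rest d := by
        simp [pvAInner, hob, hcb]
      rw [this, List.drop_succ_cons]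
      exact ih rest d (fun i hi => h (i + 1) (by omega))

-- without any '}' A's inner scan runs to the end and returns []
theorem pv_noclose : ∀ (xs : List Char) (d : Int), '}' ∉ xs → pvAInner xs d = [] := by
  intro xs
  induction xs with
  | nil => intro d _; simp [pvAInner]
  | cons ch rest ih =>
    intro d h
    have hcb : ch ≠ '}' := fun he => h (by simp [he])
    have hr : '}' ∉ rest := fun hm => h (List.mem_cons_of_mem _ hm)
    by_cases hob : ch = '{' <;> simp [pvAInner, hob, hcb, ih _ hr]

-- drop m = head :: drop (m+1)
theorem pv_drop_succ {xs : List Char} {m : Nat} {c : Char} {t : List Char}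
    (h : xs.drop m = c :: t) : t = xs.drop (m + 1) := by
  have : xs.drop (m + 1) = (xs.drop m).tail := by
    rw [← List.drop_drop]; simp
  rw [this, h]; rfl

-- A's inner scan agrees with B's brace-jumping close finder
theorem pv_inner_agree : ∀ (fuel : Nat) (xs : List Char), xs.length ≤ fuel → ∀ (d : Nat), 0 < d →
    pvAInner xs (d : Int) = (match pvBClose fuel xs d with | none => [] | some ys => ys) := by
  intro fuel
  induction fuel with
  | zero =>
    intro xs hxs d hd
    have hxnil : xs = [] := List.eq_nil_of_length_eq_zero (Nat.le_zero.mp hxs)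
    subst hxnil
    match d, hd with
    | d + 1, _ => simp [pvBClose, pvAInner]
  | succ fuel ih =>
    intro xs hxs d hd
    match d, hd with
    | d + 1, _ =>
    push_cast
    set c := PySem.Chars.find xs ['}'] with hcdef
    set o := PySem.Chars.find xs ['{'] with hodef
    by_cases hc : c = -1
    · -- no '}' at all: A scans to the end, B returns none
      have hnm : '}' ∉ xs := by
        intro hm
        have : ['}'] <:+: xs := (List.singleton_infix_iff _ _).mpr hm
        rw [← PySem.Chars.find_ne_neg_one_iff] at this
        exact this hc
      rw [pvBClose]
      simp only [← hcdef]
      rw [if_pos hc]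
      exact pv_noclose xs _ hnm
    · have hc0 : (0:Int) ≤ c := by have := PySem.Chars.neg_one_le_find xs ['}']; omega
      obtain ⟨hcpre, hcmin⟩ := PySem.Chars.find_spec (s := xs) (sub := ['}']) hc0
      obtain ⟨tc, htc⟩ := pv_singleton_prefix.mp hcpre
      by_cases ho : o ≠ -1 ∧ o < c
      · -- next brace is a '{' at o: depth increases
        have ho0 : (0:Int) ≤ o := by have := PySem.Chars.neg_one_le_find xs ['{']; omega
        obtain ⟨hopre, homin⟩ := PySem.Chars.find_spec (s := xs) (sub := ['{']) ho0
        obtain ⟨u, hu⟩ := pv_singleton_prefix.mp hopre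
        have hmon : o.toNat < c.toNat := by omega
        have hskip : ∀ i < o.toNat, ¬ ['{'] <+: xs.drop i ∧ ¬ ['}'] <+: xs.drop i :=
          fun i hi => ⟨homin i hi, hcmin i (by omega)⟩
        have hu' : u = xs.drop (o.toNat + 1) := pv_drop_succ hu
        have hlen : (xs.drop (o.toNat + 1)).length ≤ fuel := by
          have hne : xs ≠ [] := by
            intro he; rw [he] at hu; simp at hu
          simp only [List.length_drop]
          have : 0 < xs.length := List.length_pos_iff.mpr hne
          omega
        calc pvAInner xs ((d:Int) + 1)
            = pvAInner (xs.drop o.toNat) ((d:Int) + 1) := pv_skip_nobrace o.toNat xs _ hskip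
          _ = pvAInner ('{' :: u) ((d:Int) + 1) := by rw [hu]
          _ = pvAInner u ((d:Int) + 1 + 1) := by simp [pvAInner]
          _ = pvAInner (xs.drop (o.toNat + 1)) (((d + 2 : Nat) : Int)) := by
              rw [hu']; norm_cast
          _ = (match pvBClose fuel (xs.drop (o.toNat + 1)) (d + 2) with | none => [] | some ys => ys) := by
              exact ih _ hlen (d + 2) (by omega)
          _ = (match pvBClose (fuel + 1) xs (d + 1) with | none => [] | some ys => ys) := by
              conv_rhs => rw [pvBClose]
              simp only [← hcdef, ← hodef]
              rw [if_neg hc, if_pos ho]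
      · -- next brace is the '}' at c: depth decreases (or the close is found)
        have hnoopen : ∀ i < c.toNat, ¬ ['{'] <+: xs.drop i := by
          intro i hi hpre
          by_cases hoe : o = -1
          · have : '{' ∈ xs := by
              obtain ⟨t, ht⟩ := pv_singleton_prefix.mp hpre
              have : '{' ∈ xs.drop i := by rw [ht]; simp
              exact List.mem_of_mem_drop this
            have hinf : ['{'] <:+: xs := (List.singleton_infix_iff _ _).mpr this
            rw [← PySem.Chars.find_ne_neg_one_iff] at hinf
            exact hinf hoe
          · have ho0 : (0:Int) ≤ o := by have := PySem.Chars.neg_one_le_find xs ['{']; omega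
            obtain ⟨hopre, homin⟩ := PySem.Chars.find_spec (s := xs) (sub := ['{']) ho0
            have hco : c ≤ o := by
              rcases not_and_or.mp ho with h1 | h1
              · rw [not_not] at h1; exact absurd h1 hoe
              · omega
            have hcno : c ≠ o := by
              intro he
              obtain ⟨u, hu⟩ := pv_singleton_prefix.mp hopre
              simp only [← hodef] at hu
              simp only [← hcdef] at htc
              rw [← he] at hu
              rw [htc] at hu
              simp at hu
            exact homin i (by omega) hpre
        have hskip : ∀ i < c.toNat, ¬ ['{'] <+: xs.drop i ∧ ¬ ['}'] <+: xs.drop i :=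
          fun i hi => ⟨hnoopen i hi, hcmin i hi⟩
        have htc' : tc = xs.drop (c.toNat + 1) := pv_drop_succ htc
        have hA1 : pvAInner xs ((d:Int) + 1) = pvAInner ('}' :: tc) ((d:Int) + 1) := by
          rw [← htc]; exact pv_skip_nobrace c.toNat xs _ hskip
        have hBstep : pvBClose (fuel + 1) xs (d + 1) = pvBClose fuel (xs.drop (c.toNat + 1)) d := by
          conv_lhs => rw [pvBClose]
          simp only [← hcdef, ← hodef]
          rw [if_neg hc, if_neg ho]
        match d with
        | 0 =>
          -- depth was 1: this '}' is the matching close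
          rw [hA1, hBstep]
          have hv : pvAInner ('}' :: tc) (((0:Nat):Int) + 1) = tc := by
            simp only [pvAInner]
            rw [if_neg (by decide)]
            simp only [if_true]
            rw [if_pos (by norm_num)]
          rw [hv]
          simp [pvBClose, htc']
        | d + 1 =>
          -- depth was ≥ 2: decrement and continue
          push_cast at hA1 ⊢
          rw [hA1]
          have hstep : pvAInner ('}' :: tc) ((d:Int) + 1 + 1) = pvAInner tc ((d:Int) + 1) := by
            simp only [pvAInner]
            rw [if_neg (by decide)]
            simp only [if_true]
            rw [if_neg (by omega : ¬((d:Int) + 1 + 1 - 1 = 0))]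
            congr 1
            ring
          have hlen : (xs.drop (c.toNat + 1)).length ≤ fuel := by
            have hne : xs ≠ [] := by
              intro he; rw [he] at htc; simp at htc
            simp only [List.length_drop]
            have : 0 < xs.length := List.length_pos_iff.mpr hne
            omega
          rw [hstep, htc', hBstep]
          have hres := ih (xs.drop (c.toNat + 1)) hlen (d + 1) (by omega)
          push_cast at hres
          exact hres

-- A's copy loop emits the first k characters verbatim when no match starts below k
theorem pv_copy_to : ∀ (k : Nat) (xs : List Char),
    (∀ i < k, ¬ pvPat <+: xs.drop i) →
    pvALoop xs.length xs = xs.take k ++ pvALoop (xs.drop k).length (xs.drop k) := by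
  intro k
  induction k with
  | zero => intro xs _; simp
  | succ k ih =>
    intro xs h
    cases xs with
    | nil => simp
    | cons ch rest =>
      have h0 := h 0 (Nat.succ_pos k)
      simp only [List.drop_zero] at h0
      have hne : (ch :: rest).take 7 ≠ pvPat := by
        intro he
        exact h0 (List.prefix_iff_eq_take.mpr (by rw [show pvPat.length = 7 from rfl]; exact he.symm))
      simp only [List.length_cons]
      rw [pvALoop, if_neg hne]
      rw [ih rest (fun i hi => h (i + 1) (by omega))]
      simp

-- without any occurrence of the pattern A copies the whole text
theorem pv_copy_all : ∀ (xs : List Char), ¬ pvPat <:+: xs → pvALoop xs.length xs = xs := by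
  intro xs
  induction xs with
  | nil => intro _; simp [pvALoop]
  | cons ch rest ih =>
    intro h
    rw [List.infix_cons_iff, not_or] at h
    have hne : (ch :: rest).take 7 ≠ pvPat := by
      intro he
      exact h.1 (List.prefix_iff_eq_take.mpr (by rw [show pvPat.length = 7 from rfl]; exact he.symm))
    simp only [List.length_cons]
    rw [pvALoop, if_neg hne]
    rw [ih h.2]

theorem pv_main : ∀ (fuel : Nat) (xs : List Char), xs.length ≤ fuel →
    pvALoop xs.length xs = pvBLoop fuel xs := by
  intro fuel
  induction fuel with
  | zero =>
    intro xs hxs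
    have hxnil : xs = [] := List.eq_nil_of_length_eq_zero (Nat.le_zero.mp hxs)
    subst hxnil
    simp [pvALoop, pvBLoop]
  | succ fuel ih =>
    intro xs hxs
    set f := PySem.Chars.find xs pvPat with hfdef
    rw [pvBLoop]
    by_cases hf : f = -1
    · have hni : ¬ pvPat <:+: xs := by
        rw [← PySem.Chars.find_eq_neg_one_iff]; exact hf
      simp only [← hfdef]
      rw [if_pos hf]
      exact pv_copy_all xs hni
    · simp only [← hfdef]
      rw [if_neg hf]
      have hf0 : (0:Int) ≤ f := by have := PySem.Chars.neg_one_le_find xs pvPat; omega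
      obtain ⟨hfpre, hfmin⟩ := PySem.Chars.find_spec (s := xs) (sub := pvPat) hf0
      obtain ⟨t, ht⟩ := hfpre
      -- ht : pvPat ++ t = xs.drop f.toNat
      have hxlen : 7 + t.length ≤ xs.length := by
        have := congrArg List.length ht
        simp [pvPat] at this
        have hd : (xs.drop f.toNat).length ≤ xs.length := by simp
        omega
      have ht7 : t = xs.drop (f.toNat + 7) := by
        have h2 : xs.drop (f.toNat + 7) = (xs.drop f.toNat).drop 7 := by
          rw [List.drop_drop]
        rw [h2, ← ht]
        simp [pvPat]
      rw [pv_copy_to f.toNat xs (fun i hi => hfmin i hi)]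
      congr 1
      rw [← ht, ← ht7]
      -- A enters the match: one unfolding step of the copy loop
      have hAstep : pvALoop (pvPat ++ t).length (pvPat ++ t)
          = pvALoop (t.length + 6) (pvAInner ('{' :: t) 0) := by
        have hcons : pvPat ++ t = '\\' :: 'i' :: 'n' :: 'd' :: 'e' :: 'x' :: '{' :: t := by
          simp [pvPat]
        have hlen : (pvPat ++ t).length = t.length + 7 := by
          simp [pvPat]
        rw [hlen, hcons]
        show pvALoop (t.length + 6 + 1) _ = _
        rw [pvALoop, if_pos (by simp [pvPat])]
        rfl
      rw [hAstep]
      have hA2 : pvAInner ('{' :: t) 0 = pvAInner t ((1:Nat) : Int) := by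
        simp [pvAInner]
      rw [hA2, pv_inner_agree t.length t le_rfl 1 Nat.one_pos]
      cases hm : pvBClose t.length t 1 with
      | none => simp [pvALoop]
      | some ys =>
        simp only
        have hys : ys.length ≤ t.length := pvBClose_length_le t.length t 1 ys hm
        rw [pvALoop_congr (t.length + 6) ys (by omega) ys.length le_rfl]
        exact ih ys (by omega)

-- ===== VERDICT (by name: the statement is the Claim_ definition above) =====
theorem strip_index_commands_spec : Claim_equal_strip_index_commands := by
  intro text _
  unfold Spec_strip_index_commands strip_index_commands strip_index_commands_alt
  rw [pv_main text.toList.length text.toList le_rfl]
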